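-- pv_equiv track=rewrite | github.com/up33anas/DSA | Lab1/task10.py | Sort10
-- ===== SOURCE A (Python) =====
-- def Minimum(Arr, starting, ending):
--     newArr = Arr[starting : ending+1]
--     min = newArr[0]
--     for i in range(len(newArr)):
--         if newArr[i] < min:
--             min = newArr[i]
--     for i in range(len(Arr) + 1):
--         if Arr[i] == min: return i
--
-- def Sort4(arr):
--     arr = arr[:]
--     newArr = []
--     while arr:
--         minIndex = Minimum(arr, 0, len(arr))
--         newArr.append(arr[minIndex])
--         arr.pop(minIndex)
--     return newArr
--
-- def Sort10(Arr):
--     positiveArr = []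
--     negativeArr = []
--     newArr = []
--     for i in range(len(Arr)):
--         if Arr[i] >= 0:
--             positiveArr.append(Arr[i])
--         else: negativeArr.append(Arr[i])
--     positiveArr = Sort4(positiveArr)
--     negativeArr = Sort4(negativeArr)
--
--     maxLen = len(negativeArr) if len(negativeArr) > len(positiveArr) else len(positiveArr)
--     for i in range(maxLen):
--         if i < len(negativeArr):
--             newArr.append(negativeArr[i])
--         if i < len(positiveArr):
--             newArr.append(positiveArr[i])
--     return newArr
-- ===== SOURCE B (Python) =====
-- def Sort10(Arr):
--     # One global sort + slice replaces the partition loop and the two selection sorts.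
--     s = sorted(Arr)
--     k = len([x for x in Arr if x < 0])
--     neg, pos = s[:k], s[k:]
--     out = []
--     for n, p in zip(neg, pos):
--         out.append(n)
--         out.append(p)
--     m = min(len(neg), len(pos))
--     out.extend(neg[m:] if len(neg) > len(pos) else pos[m:])
--     return out
-- ===== Notes on version B (the rewrite author's own statement) =====
-- stated objective: faster
-- what changed: Replaced the partition loop plus two O(n^2) selection sorts (each step re-scanning for the minimum and re-finding its index) by one global sort of the whole list and a slice at the negative count, since every negative precedes every non-negative in sorted order; the interleave is done by zipping the two halves instead of an index loop.
import Mathlib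
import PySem

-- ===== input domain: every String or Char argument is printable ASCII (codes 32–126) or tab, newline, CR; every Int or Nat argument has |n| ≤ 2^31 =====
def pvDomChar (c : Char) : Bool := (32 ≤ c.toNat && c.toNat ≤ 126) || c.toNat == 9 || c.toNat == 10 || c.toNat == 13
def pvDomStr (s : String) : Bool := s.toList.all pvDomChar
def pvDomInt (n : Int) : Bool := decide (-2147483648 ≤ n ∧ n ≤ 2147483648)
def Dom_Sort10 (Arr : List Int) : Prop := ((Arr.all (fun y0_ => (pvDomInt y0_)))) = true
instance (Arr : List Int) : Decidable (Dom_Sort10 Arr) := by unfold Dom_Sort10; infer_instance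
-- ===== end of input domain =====

-- B replaces A's partition + two selection sorts by one global sort and a slice at the
-- negative count (objective: faster).

-- ===== PORT A =====

-- second loop of Minimum: 'for i in range(len(Arr)+1): if Arr[i] == min: return i'
-- (returns none where Python raises IndexError or falls off the end returning None)
def pyFindIdx (Arr : List Int) (m : Int) (i : Nat) : Option Int :=
  if i < Arr.length + 1 then
    match PySem.List.pyGet? Arr (i : Int) with
    | none => none
    | some v => if v == m then some (i : Int) else pyFindIdx Arr m (i + 1)
  else none
termination_by Arr.length + 1 - i

def pyMinimum (Arr : List Int) (starting ending : Int) : Option Int :=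
  let newArr := PySem.List.slice Arr (some starting) (some (ending + 1))
  match PySem.List.pyGet? newArr 0 with
  | none => none   -- newArr[0] raises IndexError on empty newArr
  | some m0 =>
    let m := (PySem.List.pyRange 0 (newArr.length : Int) 1).foldl
      (fun mn i => if PySem.List.pyGetD newArr i 0 < mn then PySem.List.pyGetD newArr i 0 else mn) m0
    pyFindIdx Arr m 0

-- Sort4's while loop (arr = arr[:] copy is identity on immutable lists); the 'none'
-- fallbacks are where Python would raise (never reached: Minimum succeeds on nonempty arr)
def pySort4Go (arr newArr : List Int) : List Int :=
  if arr = [] then newArr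
  else
    match pyMinimum arr 0 (arr.length : Int) with
    | none => newArr
    | some mi =>
      match PySem.List.pyGet? arr mi with
      | none => newArr
      | some v =>
        match hp : PySem.List.pop? arr mi with
        | none => newArr
        | some pr => pySort4Go pr.2 (newArr ++ [v])
termination_by arr.length
decreasing_by
  have := PySem.List.length_of_pop?_eq_some arr hp
  omega

def pySort4 (arr : List Int) : List Int := pySort4Go arr []

def Sort10 (Arr : List Int) : List Int :=
  let pn := (PySem.List.pyRange 0 (Arr.length : Int) 1).foldl
    (fun (st : List Int × List Int) i =>
      if PySem.List.pyGetD Arr i 0 ≥ 0 then (st.1 ++ [PySem.List.pyGetD Arr i 0], st.2)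
      else (st.1, st.2 ++ [PySem.List.pyGetD Arr i 0])) ([], [])
  let positiveArr := pySort4 pn.1
  let negativeArr := pySort4 pn.2
  let maxLen := if negativeArr.length > positiveArr.length then negativeArr.length else positiveArr.length
  (PySem.List.pyRange 0 (maxLen : Int) 1).foldl
    (fun acc i =>
      let acc2 := if i < (negativeArr.length : Int) then acc ++ [PySem.List.pyGetD negativeArr i 0] else acc
      if i < (positiveArr.length : Int) then acc2 ++ [PySem.List.pyGetD positiveArr i 0] else acc2) []

-- ===== PORT B =====
-- Source B: s = sorted(Arr); k = len([x for x in Arr if x < 0]); neg, pos = s[:k], s[k:]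
-- (k is 0 ≤ k ≤ len(s), so the slices are take/drop); zip-interleave, then the leftover tail.
def Sort10_alt (Arr : List Int) : List Int :=
  let s := PySem.List.sorted Arr (fun x => x) false
  let k := (Arr.filter (fun x => x < 0)).length
  let neg := s.take k
  let pos := s.drop k
  let out := (neg.zip pos).foldl (fun acc np => acc ++ [np.1, np.2]) []
  let m := min neg.length pos.length
  out ++ (if neg.length > pos.length then neg.drop m else pos.drop m)

-- ===== PRECONDITION & SPEC =====
def Spec_Sort10 (Arr : List Int) (out : List Int) : Prop := out = Sort10_alt Arr
instance (Arr : List Int) (out : List Int) : Decidable (Spec_Sort10 Arr out) := by unfold Spec_Sort10; infer_instance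

-- ===== CLAIM (what is proved, stated in full; the proofs are below) =====
def Claim_equal_Sort10 : Prop := ∀ (Arr : List Int), Dom_Sort10 Arr → Spec_Sort10 Arr (Sort10 Arr)

-- ===== LEMMAS AND PROOFS =====

-- the common value of both interleaving loops
def interleave : List Int → List Int → List Int
  | [], ps => ps
  | n :: ns, [] => n :: ns
  | n :: ns, p :: ps => n :: p :: interleave ns ps

@[simp] lemma interleave_nil_left (ps : List Int) : interleave [] ps = ps := rfl

@[simp] lemma interleave_nil_right (ns : List Int) : interleave ns [] = ns := by
  cases ns <;> rfl

-- A's partition loop builds the two filters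
lemma partition_foldl : ∀ (l : List Int) (p n : List Int),
    l.foldl (fun (st : List Int × List Int) v =>
      if v ≥ 0 then (st.1 ++ [v], st.2) else (st.1, st.2 ++ [v])) (p, n)
      = (p ++ l.filter (fun v => decide (0 ≤ v)), n ++ l.filter (fun v => decide (v < 0))) := by
  intro l
  induction l with
  | nil => intro p n; simp
  | cons v t ih =>
    intro p n
    by_cases h : 0 ≤ v
    · have h2 : ¬ v < 0 := by omega
      simp [ge_iff_le, h, h2, ih]
    · have h2 : v < 0 := by omega
      simp [ge_iff_le, h, h2, ih]

-- facts about A's running-minimum fold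
lemma minfold_le_init : ∀ (l : List Int) (a : Int),
    l.foldl (fun mn v => if v < mn then v else mn) a ≤ a := by
  intro l
  induction l with
  | nil => intro a; simp
  | cons v t ih =>
    intro a
    simp only [List.foldl_cons]
    by_cases h : v < a
    · have := ih v; simp only [h, if_pos]; omega
    · have := ih a; simp only [h, if_neg, not_false_iff]; omega

lemma minfold_le_mem : ∀ (l : List Int) (a x : Int), x ∈ l →
    l.foldl (fun mn v => if v < mn then v else mn) a ≤ x := by
  intro l
  induction l with
  | nil => intro a x hx; simp at hx
  | cons v t ih =>
    intro a x hx
    rcases List.mem_cons.mp hx with rfl | hx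
    · simp only [List.foldl_cons]
      by_cases h : x < a
      · have := minfold_le_init t x; simp only [h, if_pos]; omega
      · have := minfold_le_init t a; simp only [h, if_neg, not_false_iff]; omega
    · exact ih _ x hx

lemma minfold_mem : ∀ (l : List Int) (a : Int),
    l.foldl (fun mn v => if v < mn then v else mn) a = a ∨
    l.foldl (fun mn v => if v < mn then v else mn) a ∈ l := by
  intro l
  induction l with
  | nil => intro a; simp
  | cons v t ih =>
    intro a
    simp only [List.foldl_cons]
    by_cases h : v < a
    · simp only [h, if_pos]
      rcases ih v with heq | hmem
      · exact Or.inr (by simp [heq])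
      · exact Or.inr (List.mem_cons_of_mem _ hmem)
    · simp only [h, if_neg, not_false_iff]
      rcases ih a with heq | hmem
      · exact Or.inl heq
      · exact Or.inr (List.mem_cons_of_mem _ hmem)

-- pyFindIdx returns the first index of m at or after i, given m occurs there
lemma pyFindIdx_spec : ∀ (k : Nat) (l : List Int) (m : Int) (i : Nat), l.length - i = k →
    m ∈ l.drop i → pyFindIdx l m i = some ((i + (l.drop i).idxOf m : Nat) : Int) := by
  intro k
  induction k with
  | zero =>
    intro l m i hk hm
    have hle : l.length ≤ i := by omega
    simp [List.drop_eq_nil_of_le hle] at hm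
  | succ k ih =>
    intro l m i hk hm
    have hi : i < l.length := by
      by_contra h
      rw [not_lt] at h
      simp [List.drop_eq_nil_of_le h] at hm
    have hdrop : l.drop i = l[i] :: l.drop (i + 1) := List.drop_eq_getElem_cons hi
    rw [pyFindIdx, if_pos (by omega : i < l.length + 1), PySem.List.pyGet?_natCast,
      List.getElem?_eq_getElem hi]
    by_cases he : l[i] = m
    · simp only [he, BEq.rfl, if_pos]
      rw [hdrop, he, List.idxOf_cons_self]
      simp
    · have hb : (l[i] == m) = false := by simp [he]
      simp only [hb, Bool.false_eq_true, if_neg, not_false_iff]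
      have hm' : m ∈ l.drop (i + 1) := by
        rw [hdrop] at hm
        rcases List.mem_cons.mp hm with h' | h'
        · exact absurd h'.symm he
        · exact h'
      rw [ih l m (i + 1) (by omega) hm']
      congr 1
      have : (l.drop i).idxOf m = (l.drop (i + 1)).idxOf m + 1 := by
        rw [hdrop]
        exact List.idxOf_cons_ne _ he
      omega

lemma pyMinimum_spec (l : List Int) (hne : l ≠ []) :
    ∃ m, m ∈ l ∧ (∀ x ∈ l, m ≤ x) ∧
      pyMinimum l 0 (l.length : Int) = some ((l.idxOf m : Nat) : Int) := by
  have hpos : 0 < l.length := List.length_pos_of_ne_nil hne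
  have hsl : PySem.List.slice l (some 0) (some ((l.length : Int) + 1)) = l := by
    rw [PySem.List.slice_toNat l (by omega) (by omega)]
    have h1 : ((l.length : Int) + 1).toNat = l.length + 1 := by omega
    simp [h1, List.take_of_length_le (by omega : l.length ≤ l.length + 1)]
  have hget0 : PySem.List.pyGet? l 0 = some (l[0]'hpos) := by
    have : (0 : Int) = ((0 : Nat) : Int) := by norm_num
    rw [this, PySem.List.pyGet?_natCast, List.getElem?_eq_getElem hpos]
  set m0 := l[0]'hpos with hm0
  set m := l.foldl (fun mn v => if v < mn then v else mn) m0 with hm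
  have hmem : m ∈ l := by
    rcases minfold_mem l m0 with heq | hmem
    · rw [hm, heq]; exact List.getElem_mem hpos
    · exact hmem
  refine ⟨m, hmem, fun x hx => minfold_le_mem l m0 x hx, ?_⟩
  have hbridge := PySem.List.foldl_pyRange_zero_pyGetD' l 0
    (fun mn v => if v < mn then v else mn) m0
  have hfind := pyFindIdx_spec l.length l m 0 (by omega) (by simpa using hmem)
  simp only [pyMinimum, hsl, hget0, hbridge]
  simpa using hfind

-- one step of Sort4's while loop, on the branch Python actually takes
lemma pySort4Go_eq (l acc : List Int) (hl : l ≠ []) (mi v : Int) (pr : Int × List Int)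
    (hmin : pyMinimum l 0 (l.length : Int) = some mi)
    (hget : PySem.List.pyGet? l mi = some v)
    (hp : PySem.List.pop? l mi = some pr) :
    pySort4Go l acc = pySort4Go pr.2 (acc ++ [v]) := by
  rw [pySort4Go, if_neg hl, hmin]
  simp only [hget]
  split
  · next heq => rw [hp] at heq; cases heq
  · next pr' heq => rw [hp] at heq; cases heq; rfl

lemma sort4_go_acc : ∀ (n : Nat) (l acc : List Int), l.length = n →
    pySort4Go l acc = acc ++ pySort4Go l [] := by
  intro n
  induction n using Nat.strong_induction_on with
  | _ n ih =>
    intro l acc hn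
    by_cases hl : l = []
    · subst hl
      rw [pySort4Go, pySort4Go]
      simp
    · obtain ⟨m, hmem, _, hfind⟩ := pyMinimum_spec l hl
      have hidx : l.idxOf m < l.length := List.idxOf_lt_length_of_mem hmem
      have hget : PySem.List.pyGet? l ((l.idxOf m : Nat) : Int) = some m := by
        rw [PySem.List.pyGet?_natCast, List.getElem?_eq_getElem hidx, List.getElem_idxOf hidx]
      have hpop := PySem.List.pop?_natCast l (l.idxOf m) hidx
      rw [pySort4Go_eq l acc hl _ _ _ hfind hget hpop,
          pySort4Go_eq l [] hl _ _ _ hfind hget hpop]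
      have hlen := PySem.List.length_of_pop?_eq_some l hpop
      rw [ih (l.eraseIdx (l.idxOf m)).length (by simp at hlen ⊢; omega) _ (acc ++ [m]) rfl,
          ih (l.eraseIdx (l.idxOf m)).length (by simp at hlen ⊢; omega) _ ([] ++ [m]) rfl]
      simp

lemma sort4_cons (l : List Int) (hne : l ≠ []) :
    ∃ m, m ∈ l ∧ (∀ x ∈ l, m ≤ x) ∧ pySort4 l = m :: pySort4 (l.erase m) := by
  obtain ⟨m, hmem, hmin, hfind⟩ := pyMinimum_spec l hne
  have hidx : l.idxOf m < l.length := List.idxOf_lt_length_of_mem hmem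
  have hget : PySem.List.pyGet? l ((l.idxOf m : Nat) : Int) = some m := by
    rw [PySem.List.pyGet?_natCast, List.getElem?_eq_getElem hidx, List.getElem_idxOf hidx]
  have hpop := PySem.List.pop?_natCast l (l.idxOf m) hidx
  refine ⟨m, hmem, hmin, ?_⟩
  unfold pySort4
  rw [pySort4Go_eq l [] hne _ _ _ hfind hget hpop]
  rw [sort4_go_acc (l.eraseIdx (l.idxOf m)).length _ ([] ++ [m]) rfl]
  rw [← List.erase_eq_eraseIdx_of_idxOf (rfl : List.idxOf m l = List.idxOf m l)]
  simp

lemma sort4_nil : pySort4 [] = [] := by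
  unfold pySort4
  rw [pySort4Go]
  simp

lemma sort4_perm : ∀ (n : Nat) (l : List Int), l.length = n → (pySort4 l).Perm l := by
  intro n
  induction n using Nat.strong_induction_on with
  | _ n ih =>
    intro l hn
    by_cases hl : l = []
    · subst hl; rw [sort4_nil]
    · obtain ⟨m, hmem, _, heq⟩ := sort4_cons l hl
      rw [heq]
      have hpos : 0 < l.length := List.length_pos_of_ne_nil hl
      have hlen : (l.erase m).length = l.length - 1 := List.length_erase_of_mem hmem
      have hperm := ih (l.erase m).length (by omega) (l.erase m) rfl
      exact (hperm.cons m).trans (List.perm_cons_erase hmem).symm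

lemma sort4_pairwise : ∀ (n : Nat) (l : List Int), l.length = n →
    (pySort4 l).Pairwise (· ≤ ·) := by
  intro n
  induction n using Nat.strong_induction_on with
  | _ n ih =>
    intro l hn
    by_cases hl : l = []
    · subst hl; rw [sort4_nil]; exact List.Pairwise.nil
    · obtain ⟨m, hmem, hmin, heq⟩ := sort4_cons l hl
      rw [heq]
      have hpos : 0 < l.length := List.length_pos_of_ne_nil hl
      have hlen : (l.erase m).length = l.length - 1 := List.length_erase_of_mem hmem
      refine List.pairwise_cons.mpr ⟨?_, ih (l.erase m).length (by omega) (l.erase m) rfl⟩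
      intro x hx
      have hx' : x ∈ l.erase m := ((sort4_perm (l.erase m).length (l.erase m) rfl).mem_iff).mp hx
      exact hmin x (List.mem_of_mem_erase hx')

lemma sort4_eq_sorted (l : List Int) : pySort4 l = PySem.List.sorted l (fun x => x) false :=
  (PySem.List.sorted_id_eq_of_perm_of_pairwise _ _ (sort4_perm _ l rfl) (sort4_pairwise _ l rfl)).symm

lemma sorted_split (l : List Int) :
    PySem.List.sorted l (fun x => x) false =
      PySem.List.sorted (l.filter (fun v => decide (v < 0))) (fun x => x) false ++
      PySem.List.sorted (l.filter (fun v => decide (0 ≤ v))) (fun x => x) false := by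
  have hf : l.filter (fun v => decide (0 ≤ v)) = l.filter (fun x => !decide (x < 0)) := by
    refine List.filter_congr ?_
    intro x _
    by_cases h : x < 0
    · have h2 : ¬ 0 ≤ x := by omega
      simp [h, h2]
    · have h2 : 0 ≤ x := by omega
      simp [h, h2]
  have hperm : (PySem.List.sorted (l.filter (fun v => decide (v < 0))) (fun x => x) false ++
      PySem.List.sorted (l.filter (fun v => decide (0 ≤ v))) (fun x => x) false).Perm l := by
    refine ((PySem.List.sorted_perm _ _ _).append (PySem.List.sorted_perm _ _ _)).trans ?_
    rw [hf]
    exact List.filter_append_perm _ l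
  refine PySem.List.sorted_id_eq_of_perm_of_pairwise _ _ hperm ?_
  rw [List.pairwise_append]
  refine ⟨by simpa using PySem.List.sorted_pairwise (l.filter (fun v => decide (v < 0))) (fun x => x),
    by simpa using PySem.List.sorted_pairwise (l.filter (fun v => decide (0 ≤ v))) (fun x => x), ?_⟩
  intro a ha b hb
  have ha' : a < 0 := by
    have := (PySem.List.mem_sorted _ _ _ a).mp ha
    simpa using (List.mem_filter.mp this).2
  have hb' : 0 ≤ b := by
    have := (PySem.List.mem_sorted _ _ _ b).mp hb
    simpa using (List.mem_filter.mp this).2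
  omega

-- A's interleave loop computes interleave
lemma inter_loop (ns ps : List Int) : ∀ (k i : Nat) (acc : List Int),
    i + k = max ns.length ps.length →
    (PySem.List.pyRange (i : Int) ((max ns.length ps.length : Nat) : Int) 1).foldl
      (fun acc i =>
        if i < (ps.length : Int) then
          (if i < (ns.length : Int) then acc ++ [PySem.List.pyGetD ns i 0] else acc)
            ++ [PySem.List.pyGetD ps i 0]
        else if i < (ns.length : Int) then acc ++ [PySem.List.pyGetD ns i 0] else acc) acc
      = acc ++ interleave (ns.drop i) (ps.drop i) := by
  intro k
  induction k with
  | zero =>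
    intro i acc h
    rw [PySem.List.pyRange_one_eq_nil (by exact_mod_cast (by omega : max ns.length ps.length ≤ i))]
    simp [List.drop_eq_nil_of_le (by omega : ns.length ≤ i),
      List.drop_eq_nil_of_le (by omega : ps.length ≤ i)]
  | succ k ih =>
    intro i acc h
    have hi : (i : Int) < ((max ns.length ps.length : Nat) : Int) := by
      exact_mod_cast (by omega : i < max ns.length ps.length)
    rw [PySem.List.pyRange_one_cons hi, List.foldl_cons]
    have hcast : (i : Int) + 1 = ((i + 1 : Nat) : Int) := by push_cast; ring
    rw [hcast, ih (i + 1) _ (by omega)]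
    by_cases h1 : i < ns.length <;> by_cases h2 : i < ps.length
    · rw [List.drop_eq_getElem_cons h1, List.drop_eq_getElem_cons h2]
      have c1 : (i : Int) < (ns.length : Int) := by exact_mod_cast h1
      have c2 : (i : Int) < (ps.length : Int) := by exact_mod_cast h2
      simp [c1, c2, PySem.List.pyGetD_natCast, List.getElem?_eq_getElem h1,
        List.getElem?_eq_getElem h2, interleave]
    · rw [List.drop_eq_getElem_cons h1, List.drop_eq_nil_of_le (by omega : ps.length ≤ i),
        List.drop_eq_nil_of_le (by omega : ps.length ≤ i + 1)]
      have c1 : (i : Int) < (ns.length : Int) := by exact_mod_cast h1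
      have c2 : ¬ (i : Int) < (ps.length : Int) := by exact_mod_cast h2
      simp [c1, c2, PySem.List.pyGetD_natCast, List.getElem?_eq_getElem h1, interleave]
    · rw [List.drop_eq_nil_of_le (by omega : ns.length ≤ i),
        List.drop_eq_nil_of_le (by omega : ns.length ≤ i + 1), List.drop_eq_getElem_cons h2]
      have c1 : ¬ (i : Int) < (ns.length : Int) := by exact_mod_cast h1
      have c2 : (i : Int) < (ps.length : Int) := by exact_mod_cast h2
      simp [c1, c2, PySem.List.pyGetD_natCast, List.getElem?_eq_getElem h2, interleave]
    · exact absurd h (by omega)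

-- B's zip loop plus leftover tail computes interleave
lemma zip_interleave : ∀ (ns ps acc : List Int),
    ((ns.zip ps).foldl (fun acc np => acc ++ [np.1, np.2]) acc)
      ++ (if ns.length > ps.length then ns.drop (min ns.length ps.length)
          else ps.drop (min ns.length ps.length))
    = acc ++ interleave ns ps := by
  intro ns
  induction ns with
  | nil => intro ps acc; simp
  | cons n t ih =>
    intro ps acc
    cases ps with
    | nil => simp
    | cons p q =>
      have := ih q (acc ++ [n, p])
      simp only [List.zip_cons_cons, List.foldl_cons, List.length_cons, Nat.succ_min_succ,
        List.drop_succ_cons, gt_iff_lt, Nat.succ_lt_succ_iff, interleave] at this ⊢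
      rw [this]
      simp

-- the interleave loops of the two ports, as closed functions of the two halves
lemma inter_loop_closed (ns ps : List Int) :
    (PySem.List.pyRange 0 (((if ns.length > ps.length then ns.length else ps.length) : Nat) : Int) 1).foldl
      (fun acc i =>
        if i < (ps.length : Int) then
          (if i < (ns.length : Int) then acc ++ [PySem.List.pyGetD ns i 0] else acc)
            ++ [PySem.List.pyGetD ps i 0]
        else if i < (ns.length : Int) then acc ++ [PySem.List.pyGetD ns i 0] else acc) []
      = interleave ns ps := by
  have hm : (if ns.length > ps.length then ns.length else ps.length) = max ns.length ps.length := by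
    split <;> omega
  rw [hm]
  have := inter_loop ns ps (max ns.length ps.length) 0 [] (by omega)
  simpa using this

lemma zip_interleave_closed (ns ps : List Int) :
    ((ns.zip ps).foldl (fun acc np => acc ++ [np.1, np.2]) [])
      ++ (if ns.length > ps.length then ns.drop (min ns.length ps.length)
          else ps.drop (min ns.length ps.length))
    = interleave ns ps := by
  simpa using zip_interleave ns ps []

-- ===== VERDICT (by name: the statement is the Claim_ definition above) =====
theorem Sort10_spec : Claim_equal_Sort10 := by
  unfold Claim_equal_Sort10
  intro Arr _
  unfold Spec_Sort10
  simp only [Sort10, Sort10_alt]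
  rw [PySem.List.foldl_pyRange_zero_pyGetD' Arr 0
    (fun (st : List Int × List Int) v =>
      if v ≥ 0 then (st.1 ++ [v], st.2) else (st.1, st.2 ++ [v])) ([], [])]
  rw [partition_foldl Arr [] []]
  simp only [List.nil_append]
  rw [sort4_eq_sorted, sort4_eq_sorted]
  rw [inter_loop_closed]
  rw [sorted_split Arr]
  have hlen : (PySem.List.sorted (Arr.filter fun v => decide (v < 0)) (fun x => x) false).length
      = (Arr.filter fun x => decide (x < 0)).length := PySem.List.length_sorted _ _ _
  rw [List.take_left' hlen, List.drop_left' hlen]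
  rw [zip_interleave_closed]
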